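-- pv_equiv track=rewrite | github.com/mmh132/ProjectEuler | work/P821_2.py | aaa
-- ===== SOURCE A (Python) =====
-- def aaa(n):
--     t = 0
--     for p in range(2, n, 3):
--         if 2**(p+1) <= n:
--             t += 1
--         if 2*3**p <= n:
--             t += 1
--         if 2**p >= n:
--             break
--     return t
-- ===== SOURCE B (Python) =====
-- def aaa(n):
--     # Count the two monotone families independently: each condition is
--     # self-gating (it implies 2**p < n), so A's break never cuts a counted p.
--     t = 0
--     p = 2
--     while 2 ** (p + 1) <= n:
--         t += 1
--         p += 3
--     p = 2
--     while 2 * 3 ** p <= n: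
--         t += 1
--         p += 3
--     return t
-- ===== Notes on version B (the rewrite author's own statement) =====
-- stated objective: simpler
-- what changed: Replaces A's single range-loop with break and combined tests by two independent while-loops, each counting one monotone power family (2^(p+1)<=n and 2*3^p<=n) over p=2,5,8,... and summing the counts.
import Mathlib
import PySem

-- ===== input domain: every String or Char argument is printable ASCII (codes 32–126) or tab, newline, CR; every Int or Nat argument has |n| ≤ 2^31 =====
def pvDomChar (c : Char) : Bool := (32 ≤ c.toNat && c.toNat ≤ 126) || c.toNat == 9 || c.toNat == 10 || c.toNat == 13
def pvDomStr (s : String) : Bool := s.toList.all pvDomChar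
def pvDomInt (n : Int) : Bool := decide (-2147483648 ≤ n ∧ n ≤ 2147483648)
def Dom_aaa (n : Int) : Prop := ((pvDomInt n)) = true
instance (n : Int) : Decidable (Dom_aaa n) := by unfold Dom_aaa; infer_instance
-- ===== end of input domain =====

-- B replaces A's single range-loop-with-break by two independent while-loops,
-- one per monotone power family, summing their counts (objective: simpler).


-- ===== PORT A =====
-- Loop body of A's 'for p in range(2, n, 3)' with its break; every p the loop
-- visits satisfies p ≥ 2, so '.toNat' on the exponents is exact there.
def aaaLoop (n : Int) : List Int → Int → Int
  | [], t => t
  | p :: ps, t =>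
    let t1 := if 2 ^ (p + 1).toNat ≤ n then t + 1 else t
    let t2 := if 2 * 3 ^ p.toNat ≤ n then t1 + 1 else t1
    if n ≤ 2 ^ p.toNat then t2 else aaaLoop n ps t2

def aaa (n : Int) : Int := aaaLoop n (PySem.List.pyRange 2 n 3) 0

-- ===== PORT B =====
-- 'while 2**(p+1) <= n: t += 1; p += 3'  (p starts at 2 and only grows)
def aaaAltLoop1 (n p t : Int) : Int :=
  if 2 ^ (p + 1).toNat ≤ n then aaaAltLoop1 n (p + 3) (t + 1) else t
termination_by (n - p).toNat
decreasing_by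
  rename_i h
  have h1 : ((p + 1).toNat : Int) < (2 : Int) ^ (p + 1).toNat := by
    exact_mod_cast Nat.lt_two_pow_self
  have h2 : p + 1 ≤ ((p + 1).toNat : Int) := Int.self_le_toNat _
  omega

-- 'while 2*3**p <= n: t += 1; p += 3'
def aaaAltLoop2 (n p t : Int) : Int :=
  if 2 * 3 ^ p.toNat ≤ n then aaaAltLoop2 n (p + 3) (t + 1) else t
termination_by (n - p).toNat
decreasing_by
  rename_i h
  have h1 : ((p.toNat : Int)) < (3 : Int) ^ p.toNat := by
    exact_mod_cast Nat.lt_pow_self (by norm_num) (n := p.toNat)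
  have h2 : p ≤ ((p.toNat : Int)) := Int.self_le_toNat _
  have h3 : (0 : Int) ≤ 3 ^ p.toNat := by positivity
  omega

def aaa_alt (n : Int) : Int := aaaAltLoop2 n 2 (aaaAltLoop1 n 2 0)

-- ===== PRECONDITION & SPEC =====
def Spec_aaa (n : Int) (out : Int) : Prop := out = aaa_alt n
instance (n : Int) (out : Int) : Decidable (Spec_aaa n out) := by unfold Spec_aaa; infer_instance

-- ===== CLAIM (what is proved, stated in full; the proofs are below) =====
def Claim_equal_aaa : Prop := ∀ (n : Int), Dom_aaa n → Spec_aaa n (aaa n)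

-- ===== LEMMAS AND PROOFS =====

-- step-3 range, induction forms
theorem pyRange3_nil (p n : Int) (h : n ≤ p) : PySem.List.pyRange p n 3 = [] := by
  rw [PySem.List.pyRange_of_pos _ _ (by norm_num)]
  simp [if_neg (by omega : ¬ p < n)]

theorem pyRange3_cons (p n : Int) (h : p < n) :
    PySem.List.pyRange p n 3 = p :: PySem.List.pyRange (p + 3) n 3 := by
  rw [PySem.List.pyRange_of_pos _ _ (by norm_num),
      PySem.List.pyRange_of_pos _ _ (by norm_num)]
  rw [if_pos h]
  have hc : ((n - p + 3 - 1) / 3).toNat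
      = (if p + 3 < n then ((n - (p + 3) + 3 - 1) / 3).toNat else 0) + 1 := by
    split_ifs with h2 <;> omega
  rw [hc, List.range_succ_eq_map, List.map_cons, List.map_map]
  congr 1
  · norm_num
  · refine List.map_congr_left fun k _ => ?_
    simp only [Function.comp_apply]
    push_cast
    ring

-- single-unfold equations (explicit arguments keep 'rw' targeted)
theorem loop1_unfold (n p t : Int) : aaaAltLoop1 n p t
    = if 2 ^ (p + 1).toNat ≤ n then aaaAltLoop1 n (p + 3) (t + 1) else t := by
  rw [aaaAltLoop1]

theorem loop2_unfold (n p t : Int) : aaaAltLoop2 n p t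
    = if 2 * 3 ^ p.toNat ≤ n then aaaAltLoop2 n (p + 3) (t + 1) else t := by
  rw [aaaAltLoop2]

-- the guards imply p < n (used to see both guards fail once n ≤ p)
theorem guard1_lt (n p : Int) (h : 2 ^ (p + 1).toNat ≤ n) : p < n := by
  have h1 : ((p + 1).toNat : Int) < (2 : Int) ^ (p + 1).toNat := by
    exact_mod_cast Nat.lt_two_pow_self
  have h2 : p + 1 ≤ ((p + 1).toNat : Int) := Int.self_le_toNat _
  omega

theorem guard2_lt (n p : Int) (h : 2 * 3 ^ p.toNat ≤ n) : p < n := by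
  have h1 : ((p.toNat : Int)) < (3 : Int) ^ p.toNat := by
    exact_mod_cast Nat.lt_pow_self (by norm_num) (n := p.toNat)
  have h2 : p ≤ ((p.toNat : Int)) := Int.self_le_toNat _
  have h3 : (0 : Int) ≤ 3 ^ p.toNat := by positivity
  omega

-- accumulator lemmas
theorem loop1_acc (n : Int) : ∀ k p t, (n - p).toNat ≤ k →
    aaaAltLoop1 n p t = t + aaaAltLoop1 n p 0 := by
  intro k
  induction k with
  | zero =>
    intro p t hk
    have hneg : ¬ (2 : Int) ^ (p + 1).toNat ≤ n := fun h => by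
      have := guard1_lt n p h; omega
    rw [loop1_unfold n p t, if_neg hneg, loop1_unfold n p 0, if_neg hneg]
    omega
  | succ k ih =>
    intro p t hk
    rw [loop1_unfold n p t, loop1_unfold n p 0]
    split_ifs with h
    · have := guard1_lt n p h
      rw [ih (p + 3) (t + 1) (by omega), ih (p + 3) (0 + 1) (by omega)]
      omega
    · omega

theorem loop2_acc (n : Int) : ∀ k p t, (n - p).toNat ≤ k →
    aaaAltLoop2 n p t = t + aaaAltLoop2 n p 0 := by
  intro k
  induction k with
  | zero =>
    intro p t hk
    have hneg : ¬ 2 * (3 : Int) ^ p.toNat ≤ n := fun h => by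
      have := guard2_lt n p h; omega
    rw [loop2_unfold n p t, if_neg hneg, loop2_unfold n p 0, if_neg hneg]
    omega
  | succ k ih =>
    intro p t hk
    rw [loop2_unfold n p t, loop2_unfold n p 0]
    split_ifs with h
    · have := guard2_lt n p h
      rw [ih (p + 3) (t + 1) (by omega), ih (p + 3) (0 + 1) (by omega)]
      omega
    · omega

-- stepping characterisations: each while-count satisfies
-- count p = (if cond p then 1 else 0) + count (p+3), by monotonicity of the guard.
theorem loop1_step (n p : Int) :
    aaaAltLoop1 n p 0
      = (if 2 ^ (p + 1).toNat ≤ n then 1 else 0) + aaaAltLoop1 n (p + 3) 0 := by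
  rw [loop1_unfold n p 0]
  split_ifs with h
  · rw [loop1_acc n (n - (p + 3)).toNat (p + 3) (0 + 1) (le_refl _)]
    omega
  · have hmono : (2 : Int) ^ (p + 1).toNat ≤ 2 ^ (p + 3 + 1).toNat :=
      pow_le_pow_right₀ (by norm_num) (by omega)
    rw [loop1_unfold n (p + 3) 0, if_neg (by omega)]
    omega

theorem loop2_step (n p : Int) :
    aaaAltLoop2 n p 0
      = (if 2 * 3 ^ p.toNat ≤ n then 1 else 0) + aaaAltLoop2 n (p + 3) 0 := by
  rw [loop2_unfold n p 0]
  split_ifs with h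
  · rw [loop2_acc n (n - (p + 3)).toNat (p + 3) (0 + 1) (le_refl _)]
    omega
  · have hmono : (3 : Int) ^ p.toNat ≤ 3 ^ (p + 3).toNat :=
      pow_le_pow_right₀ (by norm_num) (by omega)
    rw [loop2_unfold n (p + 3) 0, if_neg (by omega)]
    omega

-- once its guard fails at p, a while-count from p is 0
theorem loop1_zero (n p : Int) (h : ¬ 2 ^ (p + 1).toNat ≤ n) : aaaAltLoop1 n p 0 = 0 := by
  rw [loop1_unfold n p 0, if_neg h]

theorem loop2_zero (n p : Int) (h : ¬ 2 * 3 ^ p.toNat ≤ n) : aaaAltLoop2 n p 0 = 0 := by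
  rw [loop2_unfold n p 0, if_neg h]

-- MAIN: A's combined pass from p equals the sum of the two while-counts from p
theorem main_lemma (n : Int) : ∀ k p t, (n - p).toNat ≤ k → 2 ≤ p →
    aaaLoop n (PySem.List.pyRange p n 3) t
      = t + aaaAltLoop1 n p 0 + aaaAltLoop2 n p 0 := by
  intro k
  induction k with
  | zero =>
    intro p t hk hp
    rw [pyRange3_nil p n (by omega),
        loop1_zero n p (fun h => by have := guard1_lt n p h; omega),
        loop2_zero n p (fun h => by have := guard2_lt n p h; omega)]
    simp [aaaLoop]
  | succ k ih =>
    intro p t hk hp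
    by_cases hpn : p < n
    · rw [pyRange3_cons p n hpn]
      have hptn : (p + 1).toNat = p.toNat + 1 := by omega
      have h23 : (2 : Int) ^ p.toNat ≤ 3 ^ p.toNat :=
        pow_le_pow_left₀ (by norm_num) (by norm_num) _
      have hpos : (1 : Int) ≤ 2 ^ p.toNat := one_le_pow₀ (by norm_num)
      have hdbl : (2 : Int) ^ (p + 1).toNat = 2 * 2 ^ p.toNat := by
        rw [hptn]; ring
      rw [loop1_step n p, loop2_step n p]
      show (let t1 := if 2 ^ (p + 1).toNat ≤ n then t + 1 else t
            let t2 := if 2 * 3 ^ p.toNat ≤ n then t1 + 1 else t1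
            if n ≤ 2 ^ p.toNat then t2 else aaaLoop n (PySem.List.pyRange (p + 3) n 3) t2) = _
      by_cases hb : n ≤ 2 ^ p.toNat
      · -- break fires; both guards are then false, and both tails are 0
        have hc1 : ¬ (2 : Int) ^ (p + 1).toNat ≤ n := by omega
        have hc2 : ¬ 2 * (3 : Int) ^ p.toNat ≤ n := by omega
        have hz1 : aaaAltLoop1 n (p + 3) 0 = 0 := by
          refine loop1_zero n (p + 3) ?_
          have hmono : (2 : Int) ^ (p + 1).toNat ≤ 2 ^ (p + 3 + 1).toNat :=
            pow_le_pow_right₀ (by norm_num) (by omega)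
          omega
        have hz2 : aaaAltLoop2 n (p + 3) 0 = 0 := by
          refine loop2_zero n (p + 3) ?_
          have hmono : (3 : Int) ^ p.toNat ≤ 3 ^ (p + 3).toNat :=
            pow_le_pow_right₀ (by norm_num) (by omega)
          omega
        simp only [if_neg hc1, if_neg hc2, if_pos hb, hz1, hz2]
        omega
      · simp only [if_neg hb]
        rw [ih (p + 3) _ (by omega) (by omega)]
        split_ifs <;> omega
    · rw [pyRange3_nil p n (by omega),
          loop1_zero n p (fun h => by have := guard1_lt n p h; omega),
          loop2_zero n p (fun h => by have := guard2_lt n p h; omega)]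
      simp [aaaLoop]

-- ===== VERDICT (by name: the statement is the Claim_ definition above) =====
theorem aaa_spec : Claim_equal_aaa := by
  intro n _
  unfold Spec_aaa aaa aaa_alt
  rw [main_lemma n (n - 2).toNat 2 0 (le_refl _) (le_refl _),
      loop2_acc n (n - 2).toNat 2 (aaaAltLoop1 n 2 0) (le_refl _)]
  omega
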